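/- CARRIED OVER by tools/port_base_units.py (renaming only) from proofs.vorbis/Vorbis/Spec/Units, GENERATED there by farm/mkstatement.py from design/units.tsv (unit `sin`) and the Specs of Vorbis/Spec/*.lean — do not edit.
   THE STATEMENT of the proof unit `sin`: the function `sin` (3 instructions) satisfies its contract,
   given the contracts of its callees. What the names mean: Vorbis/Spec/Basic.lean. The theorem to prove:
   `theorem sin_ok : ProgX.Base.Spec.sin.Statement`. -/
import ProgX.Base.Spec.Libm
namespace ProgX.Base.Spec.sin
open X86 X86.User Asan

/-- The statement of unit `sin`. -/
def Statement : Prop :=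
  ∀ (Lay : Layout) (_hLay : Lay.hi = 0x1000000) (μ : Microarch) (_hμ : UserX.MicroOK μ) (u₀ : State)
    (_hcode : HasCodeNat Lay u₀ ProgX.Base.L.sin.entry ProgX.Base.Code.code_sin.nat ProgX.Base.L.sin.size)
    (_h_sincos_quadrant : ∀ (others : List Obj) (frames : List (Nat × FrameLayout)), Calls Lay μ ProgX.Base.WayInv (ProgX.Base.conv u₀) ProgX.Base.L.sincos_quadrant.entry (ProgX.Base.Spec.sincos_quadrant.spec others frames)),
    ∀ (others : List Obj) (frames : List (Nat × FrameLayout)), Calls Lay μ ProgX.Base.WayInv (ProgX.Base.conv u₀) ProgX.Base.L.sin.entry (ProgX.Base.Spec.sin.spec others frames)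

end ProgX.Base.Spec.sin
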